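-- pv_equiv track=rewrite | github.com/SwiftWing21/helix-context | helix_context/headroom_bridge.py | _pick_specialist
-- ===== SOURCE A (Python) =====
-- from typing import Iterable, Optional
--
-- _CODE_DOMAINS = frozenset({
--     "code", "python", "rust", "javascript", "js", "typescript", "ts",
--     "go", "java", "cpp", "c", "sql", "shell", "bash",
-- })
--
-- _LOG_DOMAINS = frozenset({
--     # Strictly log-output-signaling tokens. Tool names like "cargo", "npm",
--     # "build" are excluded because they also appear in code genes (e.g. a
--     # Rust source file naturally has promoter domain "cargo" from Cargo.toml).
--     "log", "logs", "stderr", "stdout", "pytest", "jest", "traceback",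
-- })
--
-- _DIFF_DOMAINS = frozenset({"diff", "patch", "git_diff"})
--
-- def _pick_specialist(domains: Iterable[str]) -> str:
--     """Return one of: 'code' | 'log' | 'diff' | 'kompress'."""
--     domains_set = {d.lower() for d in domains if d}
--     if domains_set & _DIFF_DOMAINS:
--         return "diff"
--     if domains_set & _LOG_DOMAINS:
--         return "log"
--     if domains_set & _CODE_DOMAINS:
--         return "code"
--     return "kompress"
-- ===== SOURCE B (Python) =====
-- from typing import Iterable
--
-- _CODE_DOMAINS = frozenset({
--     "code", "python", "rust", "javascript", "js", "typescript", "ts",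
--     "go", "java", "cpp", "c", "sql", "shell", "bash",
-- })
--
-- _LOG_DOMAINS = frozenset({
--     "log", "logs", "stderr", "stdout", "pytest", "jest", "traceback",
-- })
--
-- _DIFF_DOMAINS = frozenset({"diff", "patch", "git_diff"})
--
-- # One combined index: token -> (priority, label); smaller priority wins.
-- _PRIORITY = {}
-- for _t in ("diff", "patch", "git_diff"):
--     _PRIORITY[_t] = (0, "diff")
-- for _t in ("log", "logs", "stderr", "stdout", "pytest", "jest", "traceback"):
--     _PRIORITY[_t] = (1, "log")
-- for _t in ("code", "python", "rust", "javascript", "js", "typescript", "ts",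
--            "go", "java", "cpp", "c", "sql", "shell", "bash"):
--     _PRIORITY[_t] = (2, "code")
--
-- def _pick_specialist(domains: Iterable[str]) -> str:
--     """Return one of: 'code' | 'log' | 'diff' | 'kompress'."""
--     best = None
--     for d in domains:
--         if not d:
--             continue
--         hit = _PRIORITY.get(d.lower())
--         if hit is not None and (best is None or hit[0] < best[0]):
--             best = hit
--     return best[1] if best is not None else "kompress"
-- ===== Notes on version B (the rewrite author's own statement) =====
-- stated objective: alternative
-- what changed: Replaced the build-a-set-then-three-frozenset-intersections decomposition by one combined token->(priority,label) dict and a single min-priority-tracking pass over the input.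
import Mathlib
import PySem

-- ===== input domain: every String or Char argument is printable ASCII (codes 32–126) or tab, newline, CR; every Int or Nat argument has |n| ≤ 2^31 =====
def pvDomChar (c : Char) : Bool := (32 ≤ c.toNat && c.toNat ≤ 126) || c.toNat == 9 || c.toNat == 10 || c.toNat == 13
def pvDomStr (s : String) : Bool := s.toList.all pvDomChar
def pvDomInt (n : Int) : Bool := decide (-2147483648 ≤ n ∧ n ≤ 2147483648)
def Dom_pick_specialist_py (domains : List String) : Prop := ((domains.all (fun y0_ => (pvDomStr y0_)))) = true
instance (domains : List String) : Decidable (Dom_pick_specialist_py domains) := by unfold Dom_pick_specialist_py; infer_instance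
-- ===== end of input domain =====

-- B replaces A's set comprehension plus three frozenset intersections by one combined
-- token -> (priority, label) dict and a single min-priority-tracking pass (alternative decomposition).

-- ===== PORT A =====
def pvCodeDomains : List String :=
  ["code", "python", "rust", "javascript", "js", "typescript", "ts",
   "go", "java", "cpp", "c", "sql", "shell", "bash"]

def pvLogDomains : List String :=
  ["log", "logs", "stderr", "stdout", "pytest", "jest", "traceback"]

def pvDiffDomains : List String := ["diff", "patch", "git_diff"]

def pick_specialist_py (domains : List String) : String :=
  let domains_set : PySem.Set String :=
    PySem.Set.ofList ((domains.filter (fun d => !(d == ""))).map PySem.Str.lower)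
  if PySem.Set.inter domains_set pvDiffDomains ≠ [] then "diff"
  else if PySem.Set.inter domains_set pvLogDomains ≠ [] then "log"
  else if PySem.Set.inter domains_set pvCodeDomains ≠ [] then "code"
  else "kompress"

-- ===== PORT B =====
def pvPriority : PySem.Dict String (Int × String) :=
  let d0 := pvDiffDomains.foldl (fun d t => d.insert t (0, "diff")) PySem.Dict.empty
  let d1 := pvLogDomains.foldl (fun d t => d.insert t (1, "log")) d0
  pvCodeDomains.foldl (fun d t => d.insert t (2, "code")) d1

def pvStep (best : Option (Int × String)) (d : String) : Option (Int × String) :=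
  if d == "" then best
  else
    match pvPriority.get? (PySem.Str.lower d) with
    | none => best
    | some hit =>
      match best with
      | none => some hit
      | some b => if hit.1 < b.1 then some hit else best

def pick_specialist_py_alt (domains : List String) : String :=
  match domains.foldl pvStep none with
  | some b => b.2
  | none => "kompress"

-- ===== PRECONDITION & SPEC =====
def Spec_pick_specialist_py (domains : List String) (out : String) : Prop := out = pick_specialist_py_alt domains
instance (domains : List String) (out : String) : Decidable (Spec_pick_specialist_py domains out) := by unfold Spec_pick_specialist_py; infer_instance

-- ===== CLAIM (what is proved, stated in full; the proofs are below) =====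
def Claim_equal_pick_specialist_py : Prop := ∀ (domains : List String), Dom_pick_specialist_py domains → Spec_pick_specialist_py domains (pick_specialist_py domains)

-- ===== LEMMAS AND PROOFS =====

def pvHit (toks : List String) (d : String) : Bool :=
  !(d == "") && toks.contains (PySem.Str.lower d)

def pvRef (domains : List String) : String :=
  if domains.any (pvHit pvDiffDomains) then "diff"
  else if domains.any (pvHit pvLogDomains) then "log"
  else if domains.any (pvHit pvCodeDomains) then "code"
  else "kompress"

theorem get?_foldl_const (ts : List String) (p : Int × String)
    (d : PySem.Dict String (Int × String)) (s : String) :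
    (ts.foldl (fun d t => d.insert t p) d).get? s =
      if ts.contains s then some p else d.get? s := by
  induction ts generalizing d with
  | nil => simp
  | cons t ts ih =>
    rw [List.foldl_cons, ih]
    by_cases h : s = t <;> by_cases hc : ts.contains s <;>
      simp [h, hc, PySem.Dict.get?_insert, List.contains_cons]

theorem disj_dl (s : String) : s ∈ pvDiffDomains → s ∈ pvLogDomains → False := by
  simp only [pvDiffDomains, pvLogDomains, List.mem_cons, List.not_mem_nil, or_false]
  rintro (rfl | rfl | rfl) <;> simp

theorem disj_dc (s : String) : s ∈ pvDiffDomains → s ∈ pvCodeDomains → False := by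
  simp only [pvDiffDomains, pvCodeDomains, List.mem_cons, List.not_mem_nil, or_false]
  rintro (rfl | rfl | rfl) <;> simp

theorem disj_lc (s : String) : s ∈ pvLogDomains → s ∈ pvCodeDomains → False := by
  simp only [pvLogDomains, pvCodeDomains, List.mem_cons, List.not_mem_nil, or_false]
  rintro (rfl | rfl | rfl | rfl | rfl | rfl | rfl) <;> simp

theorem pvPriority_get? (s : String) :
    pvPriority.get? s =
      if pvDiffDomains.contains s then some ((0:Int), "diff")
      else if pvLogDomains.contains s then some (1, "log")
      else if pvCodeDomains.contains s then some (2, "code")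
      else none := by
  simp only [pvPriority]
  rw [get?_foldl_const, get?_foldl_const, get?_foldl_const, PySem.Dict.get?_empty]
  by_cases hd : s ∈ pvDiffDomains <;>
    by_cases hl : s ∈ pvLogDomains <;>
    by_cases hc : s ∈ pvCodeDomains <;>
    simp [hd, hl, hc] <;>
    first
      | exact disj_dl s hd hl
      | exact disj_dc s hd hc
      | exact disj_lc s hl hc

theorem inter_ne_nil (domains : List String) (toks : List String) :
    (PySem.Set.inter
      (PySem.Set.ofList ((domains.filter (fun d => !(d == ""))).map PySem.Str.lower)) toks ≠ [])
      ↔ domains.any (pvHit toks) = true := by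
  rw [Ne, List.eq_nil_iff_forall_not_mem]
  push_neg
  simp only [PySem.Set.mem_inter, PySem.Set.mem_ofList, List.mem_map, List.mem_filter,
    List.any_eq_true, pvHit, Bool.and_eq_true, Bool.not_eq_true', beq_eq_false_iff_ne,
    List.contains_iff_mem]
  constructor
  · rintro ⟨y, ⟨⟨d, ⟨hd, hne⟩, rfl⟩, hy⟩⟩
    exact ⟨d, hd, by simp [hne, hy, List.contains_iff_mem]⟩
  · rintro ⟨d, hd, h⟩
    exact ⟨PySem.Str.lower d, ⟨⟨d, ⟨hd, by simpa using h.1⟩, rfl⟩,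
      by simpa [List.contains_iff_mem] using h.2⟩⟩

theorem portA_eq_ref (domains : List String) : pick_specialist_py domains = pvRef domains := by
  simp only [pick_specialist_py, pvRef, inter_ne_nil]

def pvComb : Option (Int × String) → Option (Int × String) → Option (Int × String)
  | none, y => y
  | some a, none => some a
  | some a, some b => if b.1 < a.1 then some b else some a

theorem pvStep_eq (acc : Option (Int × String)) (d : String) :
    pvStep acc d = pvComb acc (pvStep none d) := by
  rcases acc with _ | a <;>
    simp only [pvStep] <;>
    by_cases hd : d == "" <;>
    simp [hd, pvComb] <;>
    rcases hget : pvPriority.get? (PySem.Str.lower d) with _ | hit <;>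
    simp [pvComb]

theorem pvComb_assoc (a b c : Option (Int × String)) :
    pvComb (pvComb a b) c = pvComb a (pvComb b c) := by
  rcases a with _ | a <;> rcases b with _ | b <;> rcases c with _ | c <;>
    simp [pvComb] <;> split_ifs <;> simp [pvComb] <;> split_ifs <;> first | rfl | omega

theorem foldl_comb (l : List String) (acc : Option (Int × String)) :
    l.foldl pvStep acc = pvComb acc (l.foldl pvStep none) := by
  induction l generalizing acc with
  | nil => rcases acc with _ | a <;> rfl
  | cons d l ih =>
    rw [List.foldl_cons, List.foldl_cons, ih (pvStep acc d), ih (pvStep none d),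
      pvStep_eq acc d, pvComb_assoc]

set_option maxHeartbeats 1000000 in
theorem foldl_none (l : List String) :
    l.foldl pvStep none =
      if l.any (pvHit pvDiffDomains) then some ((0 : Int), "diff")
      else if l.any (pvHit pvLogDomains) then some (1, "log")
      else if l.any (pvHit pvCodeDomains) then some (2, "code")
      else none := by
  induction l with
  | nil => rfl
  | cons d l ih =>
    rw [List.foldl_cons, foldl_comb l (pvStep none d), ih]
    have hs : pvStep none d =
        (if d == "" then none
         else if pvDiffDomains.contains (PySem.Str.lower d) then some ((0:Int), "diff")
         else if pvLogDomains.contains (PySem.Str.lower d) then some (1, "log")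
         else if pvCodeDomains.contains (PySem.Str.lower d) then some (2, "code")
         else none) := by
      simp only [pvStep, pvPriority_get?]
      split_ifs <;> rfl
    rw [hs]
    clear hs ih
    by_cases hd : d == "" <;>
      by_cases h1 : pvDiffDomains.contains (PySem.Str.lower d) <;>
      by_cases h2 : pvLogDomains.contains (PySem.Str.lower d) <;>
      by_cases h3 : pvCodeDomains.contains (PySem.Str.lower d) <;>
      simp only [hd, h1, h2, h3, List.any_cons, pvHit, Bool.not_true, Bool.not_false,
        Bool.false_and, Bool.true_and, Bool.and_false, Bool.and_true, Bool.false_or,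
        Bool.true_or, Bool.or_false, if_true, if_false, Bool.not_eq_true] <;>
      split_ifs <;> simp_all [pvComb]

theorem portB_eq_ref (domains : List String) : pick_specialist_py_alt domains = pvRef domains := by
  rw [pick_specialist_py_alt, foldl_none, pvRef]
  split_ifs <;> rfl

-- ===== VERDICT (by name: the statement is the Claim_ definition above) =====
theorem pick_specialist_py_spec : Claim_equal_pick_specialist_py := by
  intro domains _
  unfold Spec_pick_specialist_py
  rw [portA_eq_ref, portB_eq_ref]
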